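-- pv_equiv track=rewrite | github.com/Barry-Eisenberg/streetsignals | classify.py | classify_signal_type
-- ===== SOURCE A (Python) =====
-- def classify_signal_type(s):
--     text = f"{s.get('initiative','')} {s.get('description','')}".lower()
--
--     if any(w in text for w in ['launch', 'launched', 'live', 'went live', 'go-live', 'operational', 'production']):
--         return 'Product Launch'
--     if any(w in text for w in ['partnership', 'partner', 'collaborat', 'joint', 'alliance', 'consortium']):
--         return 'Strategic Partnership'
--     if any(w in text for w in ['regulat', 'rule', 'guidance', 'framework', 'legislation', 'act ', 'compliance', 'license', 'charter', 'no-action', 'interpretive letter', 'sandbox']):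
--         return 'Regulatory Action'
--     if any(w in text for w in ['pilot', 'trial', 'experiment', 'proof of concept', 'poc', 'test']):
--         return 'Pilot / Trial'
--     if any(w in text for w in ['invest', 'funding', 'raise', 'acquisition', 'acquir', 'series', 'ipo', 'spac', 'valuation']):
--         return 'Investment / M&A'
--     if any(w in text for w in ['platform', 'infrastructure', 'network', 'system', 'solution', 'service', 'product']):
--         return 'Platform / Infrastructure'
--     if any(w in text for w in ['filing', 'filed', 'application', 'applied', 'proposal', 'proposed', 'plan', 'announced intent', 'exploring']):
--         return 'Strategic Filing / Plan'
--     if any(w in text for w in ['report', 'research', 'outlook', 'white paper', 'study', 'review']):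
--         return 'Research / Report'
--     return 'Strategic Initiative'
-- ===== SOURCE B (Python) =====
-- LABELS = [
--     'Product Launch',
--     'Strategic Partnership',
--     'Regulatory Action',
--     'Pilot / Trial',
--     'Investment / M&A',
--     'Platform / Infrastructure',
--     'Strategic Filing / Plan',
--     'Research / Report',
--     'Strategic Initiative',
-- ]
--
-- GROUPS = [
--     ['launch', 'launched', 'live', 'went live', 'go-live', 'operational', 'production'],
--     ['partnership', 'partner', 'collaborat', 'joint', 'alliance', 'consortium'],
--     ['regulat', 'rule', 'guidance', 'framework', 'legislation', 'act ', 'compliance', 'license', 'charter', 'no-action', 'interpretive letter', 'sandbox'],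
--     ['pilot', 'trial', 'experiment', 'proof of concept', 'poc', 'test'],
--     ['invest', 'funding', 'raise', 'acquisition', 'acquir', 'series', 'ipo', 'spac', 'valuation'],
--     ['platform', 'infrastructure', 'network', 'system', 'solution', 'service', 'product'],
--     ['filing', 'filed', 'application', 'applied', 'proposal', 'proposed', 'plan', 'announced intent', 'exploring'],
--     ['report', 'research', 'outlook', 'white paper', 'study', 'review'],
-- ]
--
-- # One flat keyword -> priority index (all 62 keywords are distinct, so the
-- # dict keeps every keyword with its group's index, in insertion order).
-- PRIORITY = {w: i for i, ws in enumerate(GROUPS) for w in ws}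
--
--
-- def classify_signal_type(s):
--     text = f"{s.get('initiative','')} {s.get('description','')}".lower()
--     idx = min((p for w, p in PRIORITY.items() if w in text), default=len(GROUPS))
--     return LABELS[idx]
-- ===== Notes on version B (the rewrite author's own statement) =====
-- stated objective: alternative
-- what changed: Instead of an ordered early-exit if-chain over keyword groups, B flattens all 62 keywords into one keyword->priority map, scans every keyword once collecting the priorities of all matches, and returns the label of the minimum matched priority (default = the fallback label); correct because the minimum matched group index is exactly the first group with a match.
import Mathlib
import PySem

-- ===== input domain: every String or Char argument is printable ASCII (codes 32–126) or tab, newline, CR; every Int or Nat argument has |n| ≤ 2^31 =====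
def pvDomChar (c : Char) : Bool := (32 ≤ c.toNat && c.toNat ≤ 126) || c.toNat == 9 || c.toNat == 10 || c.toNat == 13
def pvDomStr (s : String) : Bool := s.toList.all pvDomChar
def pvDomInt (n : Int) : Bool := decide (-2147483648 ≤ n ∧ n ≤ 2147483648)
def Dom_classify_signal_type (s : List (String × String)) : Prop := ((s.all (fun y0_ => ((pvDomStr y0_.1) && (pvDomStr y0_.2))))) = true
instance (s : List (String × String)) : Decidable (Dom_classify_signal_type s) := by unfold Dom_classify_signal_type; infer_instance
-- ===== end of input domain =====

-- B replaces A's ordered early-exit if-chain by one flat keyword→priority map scanned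
-- once: it collects the priorities of ALL matching keywords and returns the label of the
-- minimum matched priority (alternative algorithm, same cost).

-- ===== PORT A =====
def classify_signal_type (s : List (String × String)) : String :=
  let d := PySem.Dict.mk s
  let text := PySem.Str.lower (PySem.Str.join "" [d.getD "initiative" "", " ", d.getD "description" ""])
  if ["launch", "launched", "live", "went live", "go-live", "operational", "production"].any (fun w => PySem.Str.isIn w text) then
    "Product Launch"
  else if ["partnership", "partner", "collaborat", "joint", "alliance", "consortium"].any (fun w => PySem.Str.isIn w text) then
    "Strategic Partnership"
  else if ["regulat", "rule", "guidance", "framework", "legislation", "act ", "compliance", "license", "charter", "no-action", "interpretive letter", "sandbox"].any (fun w => PySem.Str.isIn w text) then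
    "Regulatory Action"
  else if ["pilot", "trial", "experiment", "proof of concept", "poc", "test"].any (fun w => PySem.Str.isIn w text) then
    "Pilot / Trial"
  else if ["invest", "funding", "raise", "acquisition", "acquir", "series", "ipo", "spac", "valuation"].any (fun w => PySem.Str.isIn w text) then
    "Investment / M&A"
  else if ["platform", "infrastructure", "network", "system", "solution", "service", "product"].any (fun w => PySem.Str.isIn w text) then
    "Platform / Infrastructure"
  else if ["filing", "filed", "application", "applied", "proposal", "proposed", "plan", "announced intent", "exploring"].any (fun w => PySem.Str.isIn w text) then
    "Strategic Filing / Plan"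
  else if ["report", "research", "outlook", "white paper", "study", "review"].any (fun w => PySem.Str.isIn w text) then
    "Research / Report"
  else
    "Strategic Initiative"

-- ===== PORT B =====
def pvLabels : List String :=
  [ "Product Launch", "Strategic Partnership", "Regulatory Action", "Pilot / Trial",
    "Investment / M&A", "Platform / Infrastructure", "Strategic Filing / Plan",
    "Research / Report", "Strategic Initiative" ]

def pvGroups : List (List String) :=
  [ ["launch", "launched", "live", "went live", "go-live", "operational", "production"],
    ["partnership", "partner", "collaborat", "joint", "alliance", "consortium"],
    ["regulat", "rule", "guidance", "framework", "legislation", "act ", "compliance", "license", "charter", "no-action", "interpretive letter", "sandbox"],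
    ["pilot", "trial", "experiment", "proof of concept", "poc", "test"],
    ["invest", "funding", "raise", "acquisition", "acquir", "series", "ipo", "spac", "valuation"],
    ["platform", "infrastructure", "network", "system", "solution", "service", "product"],
    ["filing", "filed", "application", "applied", "proposal", "proposed", "plan", "announced intent", "exploring"],
    ["report", "research", "outlook", "white paper", "study", "review"] ]

-- PRIORITY = {w: i for i, ws in enumerate(GROUPS) for w in ws}: all 62 keywords are
-- distinct, so the dict's items are exactly this flattened list in insertion order.
def pvPairs : List (String × Int) :=
  (PySem.List.enumerate pvGroups 0).flatMap (fun iws => iws.2.map (fun w => (w, iws.1)))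

def classify_signal_type_alt (s : List (String × String)) : String :=
  let d := PySem.Dict.mk s
  let text := PySem.Str.lower (PySem.Str.join "" [d.getD "initiative" "", " ", d.getD "description" ""])
  -- min((p for w, p in PRIORITY.items() if w in text), default=len(GROUPS))
  let cand := pvPairs.filterMap (fun wp => if PySem.Str.isIn wp.1 text then some wp.2 else none)
  let idx : Int := match cand with
    | [] => (pvGroups.length : Int)
    | x :: xs => xs.foldl min x
  -- LABELS[idx]: idx always lies in 0..8, so the lookup never fails (getD "" is never taken)
  (PySem.List.pyGet? pvLabels idx).getD ""

-- ===== PRECONDITION & SPEC =====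
def Spec_classify_signal_type (s : List (String × String)) (out : String) : Prop := out = classify_signal_type_alt s
instance (s : List (String × String)) (out : String) : Decidable (Spec_classify_signal_type s out) := by unfold Spec_classify_signal_type; infer_instance

-- ===== CLAIM (what is proved, stated in full; the proofs are below) =====
def Claim_equal_classify_signal_type : Prop := ∀ (s : List (String × String)), Dom_classify_signal_type s → Spec_classify_signal_type s (classify_signal_type s)

-- ===== LEMMAS AND PROOFS =====

-- candidate priorities of the flattened groups, group by group (proof-only helper)
def pvFlat (text : String) : Int → List (List String) → List Int
  | _, [] => []
  | k, g :: gs =>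
      List.replicate (g.filter (fun w => PySem.Str.isIn w text)).length k ++ pvFlat text (k+1) gs

-- index of the first matching group (proof-only helper)
def pvFirstIdx (text : String) : List (List String) → Int
  | [] => 0
  | g :: gs => if g.any (fun w => PySem.Str.isIn w text) then 0 else 1 + pvFirstIdx text gs

theorem pvFilterMap_map_const (text : String) (i : Int) (g : List String) :
    (g.map (fun w => (w, i))).filterMap
        (fun wp => if PySem.Str.isIn wp.1 text then some wp.2 else none)
      = List.replicate (g.filter (fun w => PySem.Str.isIn w text)).length i := by
  induction g with
  | nil => rfl
  | cons w ws ih =>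
      simp only [List.map_cons, List.filterMap_cons, List.filter_cons]
      by_cases h : PySem.Str.isIn w text
      · rw [if_pos h, if_pos h, ih]
        simp [List.replicate_succ]
      · rw [if_neg h, if_neg h, ih]

theorem pvCand_eq_flat (text : String) (gs : List (List String)) :
    ∀ k : Int,
      ((PySem.List.enumerate gs k).flatMap (fun iws => iws.2.map (fun w => (w, iws.1)))).filterMap
          (fun wp => if PySem.Str.isIn wp.1 text then some wp.2 else none)
        = pvFlat text k gs := by
  induction gs with
  | nil => intro k; rfl
  | cons g gs ih =>
      intro k
      simp only [PySem.List.enumerate_cons, List.flatMap_cons, List.filterMap_append,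
        pvFilterMap_map_const, ih, pvFlat]

theorem pvFlat_ge (text : String) (gs : List (List String)) :
    ∀ (k : Int) (n : Int), n ∈ pvFlat text k gs → k ≤ n := by
  induction gs with
  | nil => intro k n h; simp [pvFlat] at h
  | cons g gs ih =>
      intro k n h
      rcases List.mem_append.1 h with h1 | h1
      · exact le_of_eq ((List.eq_of_mem_replicate h1)).symm
      · have := ih (k + 1) n h1; omega

theorem pvFoldl_min_const (l : List Int) : ∀ s : Int, (∀ x ∈ l, s ≤ x) → l.foldl min s = s := by
  induction l with
  | nil => intro s _; rfl
  | cons x xs ih =>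
      intro s h
      have hx : min s x = s := min_eq_left (h x (by simp))
      simp only [List.foldl_cons, hx]
      exact ih s (fun y hy => h y (by simp [hy]))

theorem pvMin_flat (text : String) (gs : List (List String)) :
    ∀ k : Int,
      (match pvFlat text k gs with
        | [] => k + (gs.length : Int)
        | x :: xs => xs.foldl min x) = k + pvFirstIdx text gs := by
  induction gs with
  | nil => intro k; simp [pvFlat, pvFirstIdx]
  | cons g gs ih =>
      intro k
      by_cases h : g.any (fun w => PySem.Str.isIn w text)
      · -- first group matches: its candidate block is a nonempty run of k's
        have hpos : 0 < (g.filter (fun w => PySem.Str.isIn w text)).length := by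
          rcases List.any_eq_true.1 h with ⟨w, hw, hw2⟩
          exact List.length_pos_of_mem (List.mem_filter.2 ⟨hw, hw2⟩)
        obtain ⟨m, hm⟩ : ∃ m, (g.filter (fun w => PySem.Str.isIn w text)).length = m + 1 :=
          ⟨_, (Nat.succ_pred_eq_of_pos hpos).symm⟩
        have hmin : (List.replicate m k ++ pvFlat text (k + 1) gs).foldl min k = k := by
          apply pvFoldl_min_const
          intro x hx
          rcases List.mem_append.1 hx with hx | hx
          · exact le_of_eq (List.eq_of_mem_replicate hx).symm
          · have := pvFlat_ge text gs (k + 1) x hx; omega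
        show (match pvFlat text k (g :: gs) with
          | [] => k + ((g :: gs).length : Int)
          | x :: xs => xs.foldl min x) = k + pvFirstIdx text (g :: gs)
        rw [pvFirstIdx, if_pos h]
        simp only [pvFlat, hm, List.replicate_succ, List.cons_append]
        simpa using hmin
      · -- first group does not match: its candidate block is empty
        have hf : (g.filter (fun w => PySem.Str.isIn w text)) = [] := by
          rw [List.filter_eq_nil_iff]
          intro w hw
          exact fun hc => h (List.any_eq_true.2 ⟨w, hw, hc⟩)
        have hrec := ih (k + 1)
        show (match pvFlat text k (g :: gs) with
          | [] => k + ((g :: gs).length : Int)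
          | x :: xs => xs.foldl min x) = k + pvFirstIdx text (g :: gs)
        rw [pvFirstIdx, if_neg h]
        simp only [pvFlat, hf, List.length_nil, List.replicate_zero, List.nil_append]
        rcases hrest : pvFlat text (k + 1) gs with _ | ⟨x, xs⟩
        · rw [hrest] at hrec
          simp at hrec ⊢
          omega
        · rw [hrest] at hrec
          simp at hrec ⊢
          omega

theorem pvMin_flat0 (text : String) :
    (match pvFlat text 0 pvGroups with
      | [] => (pvGroups.length : Int)
      | x :: xs => xs.foldl min x) = pvFirstIdx text pvGroups := by
  have h := pvMin_flat text pvGroups 0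
  rcases hf : pvFlat text 0 pvGroups with _ | ⟨x, xs⟩ <;> rw [hf] at h <;>
    simp at h ⊢ <;> omega

-- ===== VERDICT (by name: the statement is the Claim_ definition above) =====
theorem classify_signal_type_spec : Claim_equal_classify_signal_type := by
  intro s _
  unfold Spec_classify_signal_type
  simp only [classify_signal_type, classify_signal_type_alt, pvPairs]
  rw [pvCand_eq_flat, pvMin_flat0]
  simp only [pvFirstIdx, pvGroups]
  split_ifs <;> decide
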